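-- pv_equiv track=rewrite | github.com/aiden-d/Python-CSV-Translator | spanishdict.py | remove_before_char
-- ===== SOURCE A (Python) =====
-- def remove_before_char(s,c):
--     #inputs a char to remove before (c, inclusive) on a string(s)
--     final = ''
--     write = False
--     for l in s:
--         if (write==True):
--             final = final +l
--         if l==c:
--             write = True
--     return final
-- ===== SOURCE B (Python) =====
-- def remove_before_char(s, c):
--     # Early-exit: return the suffix after the first character equal to c.
--     for i, ch in enumerate(s):
--         if ch == c:
--             return s[i+1:]
--     return ''
-- ===== Notes on version B (the rewrite author's own statement) =====
-- stated objective: simpler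
-- what changed: Replaces the full scan with a write-flag accumulator by an enumerate loop that returns the slice s[i+1:] immediately at the first character equal to c (and '' after the loop), so no accumulator is maintained and the scan stops early.
import Mathlib
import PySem

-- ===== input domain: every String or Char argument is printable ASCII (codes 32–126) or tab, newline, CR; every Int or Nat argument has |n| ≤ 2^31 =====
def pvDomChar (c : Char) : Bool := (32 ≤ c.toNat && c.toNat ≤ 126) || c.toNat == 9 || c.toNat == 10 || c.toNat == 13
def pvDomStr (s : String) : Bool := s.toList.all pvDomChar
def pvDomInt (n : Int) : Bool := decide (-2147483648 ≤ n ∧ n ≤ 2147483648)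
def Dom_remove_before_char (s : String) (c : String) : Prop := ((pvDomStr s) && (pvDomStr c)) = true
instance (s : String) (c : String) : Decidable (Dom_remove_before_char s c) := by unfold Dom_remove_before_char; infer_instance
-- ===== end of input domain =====

-- B replaces A's write-flag accumulator scan by an early-returning enumerate loop with a slice (simpler).
-- Strings are handled as char lists (PySem convention); Python's one-char 'l == c' is '[l] = c.toList'.

-- ===== PORT A =====
-- A's loop step: append l to final when write is set, then set write if l == c.
def rbcStep (c : List Char) (st : List Char × Bool) (l : Char) : List Char × Bool :=
  let st' := if st.2 = true then (st.1 ++ [l], st.2) else st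
  if [l] = c then (st'.1, true) else st'

def remove_before_char (s : String) (c : String) : String :=
  String.ofList (s.toList.foldl (rbcStep c.toList) ([], false)).1

-- ===== PORT B =====
-- B's loop: enumerate(s); on ch == c return s[i+1:]; else '' after the loop.
def rbcGo (s : List Char) (c : List Char) : List Char → Nat → String
  | [], _ => ""
  | ch :: rest, i =>
    if [ch] = c then String.ofList (PySem.List.slice s (some ((i : Int) + 1)) none)
    else rbcGo s c rest (i + 1)

def remove_before_char_alt (s : String) (c : String) : String :=
  rbcGo s.toList c.toList s.toList 0

-- ===== PRECONDITION & SPEC =====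
def Spec_remove_before_char (s : String) (c : String) (out : String) : Prop := out = remove_before_char_alt s c
instance (s : String) (c : String) (out : String) : Decidable (Spec_remove_before_char s c out) := by unfold Spec_remove_before_char; infer_instance

-- ===== CLAIM (what is proved, stated in full; the proofs are below) =====
def Claim_equal_remove_before_char : Prop := ∀ (s : String) (c : String), Dom_remove_before_char s c → Spec_remove_before_char s c (remove_before_char s c)

-- ===== LEMMAS AND PROOFS =====

-- common reference: the suffix after the first char equal to c
def rbcAfter (c : List Char) : List Char → List Char
  | [] => []
  | ch :: rest => if [ch] = c then rest else rbcAfter c rest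

-- A with write already set appends everything remaining
theorem rbcFold_true (c : List Char) (xs acc : List Char) :
    xs.foldl (rbcStep c) (acc, true) = (acc ++ xs, true) := by
  induction xs generalizing acc with
  | nil => simp
  | cons l xs ih =>
    simp only [List.foldl_cons, rbcStep]
    split_ifs <;> simp [ih]

-- A with write unset yields acc ++ (suffix after first match)
theorem rbcFold_false (c : List Char) (xs acc : List Char) :
    xs.foldl (rbcStep c) (acc, false) = (acc ++ rbcAfter c xs, false) ∨
    xs.foldl (rbcStep c) (acc, false) = (acc ++ rbcAfter c xs, true) := by
  induction xs generalizing acc with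
  | nil => left; simp [rbcAfter]
  | cons l xs ih =>
    simp only [List.foldl_cons, rbcStep, rbcAfter]
    by_cases h : [l] = c
    · right; simp [h, rbcFold_true]
    · simpa [h] using ih acc

-- B's go computes the suffix after the first match of the remaining list
theorem rbcGo_eq (s c : List Char) (xs : List Char) (i : Nat)
    (h : s.drop i = xs) :
    rbcGo s c xs i = String.ofList (rbcAfter c xs) := by
  induction xs generalizing i with
  | nil => simp [rbcGo, rbcAfter]
  | cons ch rest ih =>
    simp only [rbcGo, rbcAfter]
    by_cases hm : [ch] = c
    · have h1 : ((i : Int) + 1) = ((i + 1 : Nat) : Int) := by push_cast; ring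
      have h2 : s.drop (i + 1) = rest := by
        have := congrArg (List.drop 1) h
        simpa [List.drop_drop, Nat.add_comm] using this
      rw [h1, PySem.List.slice_from_natCast, h2]
      simp [hm]
    · have h2 : s.drop (i + 1) = rest := by
        have := congrArg (List.drop 1) h
        simpa [List.drop_drop, Nat.add_comm] using this
      simp [hm, ih (i + 1) h2]

-- ===== VERDICT (by name: the statement is the Claim_ definition above) =====
theorem remove_before_char_spec : Claim_equal_remove_before_char := by
  intro s c _
  unfold Spec_remove_before_char remove_before_char remove_before_char_alt
  rw [rbcGo_eq s.toList c.toList s.toList 0 (by simp)]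
  rcases rbcFold_false c.toList s.toList [] with h | h <;> simp [h]
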